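-- pv_equiv track=rewrite | github.com/vigneshsabapathi/python-algorithms | ciphers/beaufort_cipher_optimized.py | cipher_v2
-- ===== SOURCE A (Python) =====
-- def cipher_v2(message: str, key: str) -> str:
--     key_upper = key.upper()
--     out, ki = [], 0
--     for ch in message.upper():
--         if ch == " ":
--             out.append(" ")
--         else:
--             c = (ord(ch) - ord(key_upper[ki % len(key_upper)])) % 26 + 65
--             out.append(chr(c))
--             ki += 1
--     return "".join(out)
-- ===== SOURCE B (Python) =====
-- def cipher_v2(message: str, key: str) -> str:
--     mu = message.upper()
--     ku = key.upper()
--     letters = [c for c in mu if c != " "]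
--     encoded = [chr((ord(c) - ord(ku[i % len(ku)])) % 26 + 65) for i, c in enumerate(letters)]
--     it = iter(encoded)
--     return "".join(" " if c == " " else next(it) for c in mu)
-- ===== Notes on version B (the rewrite author's own statement) =====
-- stated objective: alternative
-- what changed: A encodes in one interleaved pass carrying a conditional key counter; B filters out the spaces, encodes the compact letter list by enumerate index mod key length, then re-weaves the spaces back in a second pass.
import Mathlib
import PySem

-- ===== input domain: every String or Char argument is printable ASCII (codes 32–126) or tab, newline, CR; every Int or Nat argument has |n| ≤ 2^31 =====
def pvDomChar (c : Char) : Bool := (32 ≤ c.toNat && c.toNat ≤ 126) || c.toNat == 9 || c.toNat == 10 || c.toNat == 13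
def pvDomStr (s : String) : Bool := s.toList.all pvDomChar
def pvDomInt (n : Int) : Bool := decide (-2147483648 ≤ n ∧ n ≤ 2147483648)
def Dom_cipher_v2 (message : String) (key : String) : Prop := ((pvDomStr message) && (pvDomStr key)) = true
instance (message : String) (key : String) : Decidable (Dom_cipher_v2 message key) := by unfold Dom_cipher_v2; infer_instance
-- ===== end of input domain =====

-- B re-implements the Beaufort encoding as filter / encode-by-index / re-weave spaces, instead of A's
-- single pass with a conditional key counter; same cost, different decomposition ("alternative").
-- Both Pythons raise ZeroDivisionError when the key is empty and a non-space character occurs; Pre_ excludes exactly that.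

-- shared per-character Beaufort arithmetic (identical expression in both Pythons)
def encChar (ku : List Char) (ki : Int) (ch : Char) : Char :=
  Char.ofNat (PySem.Int.mod ((ch.toNat : Int) - ((PySem.List.pyGetD ku (PySem.Int.mod ki (ku.length : Int)) ' ').toNat : Int)) 26 + 65).toNat

-- ===== PORT A =====
def cipher_v2 (message : String) (key : String) : String :=
  let ku := (PySem.Str.upper key).toList
  let r := (PySem.Str.upper message).toList.foldl
    (fun (st : List Char × Int) ch =>
      if ch = ' ' then (st.1 ++ [' '], st.2)
      else (st.1 ++ [encChar ku st.2 ch], st.2 + 1)) ([], 0)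
  String.mk r.1

-- ===== PORT B =====
def cipher_v2_alt (message : String) (key : String) : String :=
  let mu := (PySem.Str.upper message).toList
  let ku := (PySem.Str.upper key).toList
  let letters := mu.filter (fun c => c ≠ ' ')
  let encoded := (PySem.List.enumerate letters 0).map (fun p => encChar ku p.1 p.2)
  let r := mu.foldl
    (fun (st : List Char × List Char) c =>
      if c = ' ' then (st.1 ++ [' '], st.2)
      else (st.1 ++ [st.2.headD ' '], st.2.tail)) ([], encoded)
  String.mk r.1

-- ===== PRECONDITION & SPEC =====
-- Pre_ excludes exactly the inputs where Python A raises ZeroDivisionError: empty key together with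
-- at least one non-space character in the message.
def Pre_cipher_v2 (message : String) (key : String) : Prop :=
  key ≠ "" ∨ message.toList.all (fun c => c == ' ') = true
instance (message : String) (key : String) : Decidable (Pre_cipher_v2 message key) := by unfold Pre_cipher_v2; infer_instance
def pvWitness_cipher_v2 : String × String := ("AB c!", "Key")

def Spec_cipher_v2 (message : String) (key : String) (out : String) : Prop := out = cipher_v2_alt message key
instance (message : String) (key : String) (out : String) : Decidable (Spec_cipher_v2 message key out) := by unfold Spec_cipher_v2; infer_instance

-- ===== CLAIM (what is proved, stated in full; the proofs are below) =====
def Claim_equal_cipher_v2 : Prop := ∀ (message : String) (key : String), Dom_cipher_v2 message key → Pre_cipher_v2 message key → Spec_cipher_v2 message key (cipher_v2 message key)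

-- ===== LEMMAS AND PROOFS =====

-- the common interleaved result both folds compute
def weave (ku : List Char) (ki : Int) : List Char → List Char
  | [] => []
  | c :: l => if c = ' ' then ' ' :: weave ku ki l else encChar ku ki c :: weave ku (ki + 1) l

-- the compact encoded list B builds
def encList (ku : List Char) (ki : Int) : List Char → List Char
  | [] => []
  | c :: l => encChar ku ki c :: encList ku (ki + 1) l

theorem enum_map_encList (ku : List Char) (l : List Char) (s : Int) :
    (PySem.List.enumerate l s).map (fun p => encChar ku p.1 p.2) = encList ku s l := by
  induction l generalizing s with
  | nil => simp [PySem.List.enumerate_nil, encList]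
  | cons c l ih => simp [PySem.List.enumerate_cons, encList, ih]

theorem foldA (ku : List Char) (l : List Char) (out : List Char) (ki : Int) :
    l.foldl (fun (st : List Char × Int) ch =>
      if ch = ' ' then (st.1 ++ [' '], st.2)
      else (st.1 ++ [encChar ku st.2 ch], st.2 + 1)) (out, ki)
    = (out ++ weave ku ki l, ki + ((l.filter (fun c => c ≠ ' ')).length : Int)) := by
  induction l generalizing out ki with
  | nil => simp [weave]
  | cons c l ih =>
    by_cases h : c = ' '
    · simp [List.foldl_cons, h, weave, ih]
    · simp [List.foldl_cons, h, weave, ih]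
      ring

theorem foldB (ku : List Char) (l : List Char) (out : List Char) (ki : Int) :
    l.foldl (fun (st : List Char × List Char) c =>
      if c = ' ' then (st.1 ++ [' '], st.2)
      else (st.1 ++ [st.2.headD ' '], st.2.tail)) (out, encList ku ki (l.filter (fun c => c ≠ ' ')))
    = (out ++ weave ku ki l, []) := by
  induction l generalizing out ki with
  | nil => simp [weave, encList]
  | cons c l ih =>
    by_cases h : c = ' '
    · simpa [List.foldl_cons, h, weave] using ih (out ++ [' ']) ki
    · simpa [List.foldl_cons, h, weave, encList] using ih (out ++ [encChar ku ki c]) (ki + 1)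

-- ===== VERDICT (by name: the statement is the Claim_ definition above) =====
theorem cipher_v2_spec : Claim_equal_cipher_v2 := by
  intro message key _ _
  unfold Spec_cipher_v2 cipher_v2 cipher_v2_alt
  simp only [enum_map_encList, foldA, foldB]
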